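-- pv_equiv track=rewrite | github.com/VincentHaring/python_project-euler | problems/helper.py | splitInt
-- ===== SOURCE A (Python) =====
-- def splitInt(n):
--
-- 	l = []
-- 	s = "+"
--
-- 	if n == 0:
-- 		l = [0]
-- 		return s, l
--
-- 	if n < 0:
--
-- 		n = abs(n)
-- 		s = "-"
--
-- 	t = str(n)
--
-- 	for c in t:
--
-- 		l.append(int(c))
--
-- 	return s, l
-- ===== SOURCE B (Python) =====
-- def splitInt(n):
--     # Arithmetic digit extraction via divmod; no str() conversion.
--     if n == 0:
--         return "+", [0]
--     s = "+"
--     if n < 0: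
--         s = "-"
--         n = -n
--     digs = []
--     while n:
--         n, d = divmod(n, 10)
--         digs.append(d)
--     digs.reverse()
--     return s, digs
-- ===== Notes on version B (the rewrite author's own statement) =====
-- stated objective: alternative
-- what changed: Digits are peeled arithmetically with divmod(n,10) into a list that is reversed at the end, instead of converting n to a string and mapping int over its characters.
import Mathlib
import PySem

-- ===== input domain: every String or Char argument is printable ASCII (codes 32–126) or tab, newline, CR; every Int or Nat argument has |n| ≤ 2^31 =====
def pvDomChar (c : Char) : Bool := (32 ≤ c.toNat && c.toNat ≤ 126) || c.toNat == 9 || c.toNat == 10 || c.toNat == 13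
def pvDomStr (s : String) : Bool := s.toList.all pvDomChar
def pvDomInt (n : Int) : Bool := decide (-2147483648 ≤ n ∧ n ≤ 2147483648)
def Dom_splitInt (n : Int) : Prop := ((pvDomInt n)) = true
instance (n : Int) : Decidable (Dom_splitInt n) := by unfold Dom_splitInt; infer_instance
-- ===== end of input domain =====

-- B peels decimal digits arithmetically with divmod instead of mapping int over str(n); alternative decomposition, same cost.

-- ===== PORT A =====
-- int(c) on a single digit character, exact via PySem.Int.ofChars? (never none on the digits str(n) yields)
def splitInt (n : Int) : String × List Int :=
  let l : List Int := []
  let s : String := "+"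
  if n = 0 then (s, [0])
  else
    let ns : Int × String := if n < 0 then (|n|, "-") else (n, s)
    let t := PySem.Int.toStr ns.1
    let l := t.toList.foldl (fun l c => l ++ [(PySem.Int.ofChars? [c]).getD 0]) l
    (ns.2, l)

-- ===== PORT B =====
-- the while-loop of Source B: appending least-significant digits then reversing = prepending into acc
def pvPeel (m : Nat) (acc : List Int) : List Int :=
  if h : m = 0 then acc
  else pvPeel (m / 10) (((m % 10 : Nat) : Int) :: acc)
decreasing_by exact Nat.div_lt_self (Nat.pos_of_ne_zero h) (by norm_num)

def splitInt_alt (n : Int) : String × List Int :=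
  if n = 0 then ("+", [0])
  else if n < 0 then ("-", pvPeel n.natAbs [])
  else ("+", pvPeel n.toNat [])

-- ===== PRECONDITION & SPEC =====
def Spec_splitInt (n : Int) (out : String × List Int) : Prop := out = splitInt_alt n
instance (n : Int) (out : String × List Int) : Decidable (Spec_splitInt n out) := by unfold Spec_splitInt; infer_instance

-- ===== CLAIM (what is proved, stated in full; the proofs are below) =====
def Claim_equal_splitInt : Prop := ∀ (n : Int), Dom_splitInt n → Spec_splitInt n (splitInt n)

-- ===== LEMMAS AND PROOFS =====

def pvDigitVal (c : Char) : Int := (PySem.Int.ofChars? [c]).getD 0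

theorem pvDigitVal_digitChar (r : Nat) (h : r < 10) :
    pvDigitVal (Nat.digitChar r) = (r : Int) := by
  interval_cases r <;> decide

theorem pvPeel_toDigitsCore : ∀ (fuel m : Nat) (ds : List Char), 0 < m → m < 10 ^ (fuel + 1) →
    (Nat.toDigitsCore 10 (fuel + 1) m ds).map pvDigitVal = pvPeel m (ds.map pvDigitVal) := by
  intro fuel
  induction fuel with
  | zero =>
    intro m ds hm hlt
    have hm10 : m < 10 := by simpa using hlt
    have h10 : m / 10 = 0 := Nat.div_eq_of_lt hm10
    rw [Nat.toDigitsCore, if_pos h10]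
    rw [pvPeel, dif_neg hm.ne', h10, pvPeel]
    simp [Nat.mod_eq_of_lt hm10, pvDigitVal_digitChar m hm10]
  | succ fuel ih =>
    intro m ds hm hlt
    rw [Nat.toDigitsCore]
    by_cases h10 : m / 10 = 0
    · rw [if_pos h10]
      have hm10 : m < 10 := Nat.lt_of_div_eq_zero (by norm_num) h10
      rw [pvPeel, dif_neg hm.ne', h10, pvPeel]
      simp [Nat.mod_eq_of_lt hm10, pvDigitVal_digitChar m hm10]
    · rw [if_neg h10]
      have hlt' : m / 10 < 10 ^ (fuel + 1) :=
        Nat.div_lt_of_lt_mul (by rw [pow_succ] at hlt; omega)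
      rw [ih (m / 10) _ (Nat.pos_of_ne_zero h10) hlt']
      rw [List.map_cons, pvDigitVal_digitChar _ (Nat.mod_lt _ (by norm_num))]
      conv_rhs => rw [pvPeel, dif_neg hm.ne']

theorem pvPeel_toDigits (m : Nat) (hm : 0 < m) :
    (Nat.toDigits 10 m).map pvDigitVal = pvPeel m [] := by
  have h : m < 10 ^ (m + 1) := lt_of_lt_of_le (Nat.lt_pow_self (by norm_num))
    (Nat.pow_le_pow_right (by norm_num) (Nat.le_succ m))
  simpa using pvPeel_toDigitsCore m m [] hm h

theorem map_foldl_append (cs : List Char) (l : List Int) :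
    cs.foldl (fun l c => l ++ [(PySem.Int.ofChars? [c]).getD 0]) l = l ++ cs.map pvDigitVal :=
  PySem.List.foldl_append_singleton_eq_map pvDigitVal cs l

-- ===== VERDICT (by name: the statement is the Claim_ definition above) =====
theorem splitInt_spec : Claim_equal_splitInt := by
  intro n _
  unfold Spec_splitInt splitInt splitInt_alt
  by_cases h0 : n = 0
  · simp [h0]
  · rw [if_neg h0, if_neg h0]
    by_cases hneg : n < 0
    · rw [if_pos hneg, if_pos hneg]
      have habs : ¬ (|n| < 0) := not_lt.mpr (abs_nonneg n)
      simp only [PySem.Int.toStr, PySem.Int.toChars, String.toList_ofList, if_neg habs]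
      rw [map_foldl_append, List.nil_append]
      have : |n|.toNat = n.natAbs := by
        rw [abs_of_neg hneg]; omega
      rw [this, pvPeel_toDigits n.natAbs (by omega)]
    · rw [if_neg hneg, if_neg hneg]
      have hpos : 0 < n := lt_of_le_of_ne (not_lt.mp hneg) (Ne.symm h0)
      simp only [PySem.Int.toStr, PySem.Int.toChars, String.toList_ofList, if_neg hneg]
      rw [map_foldl_append, List.nil_append]
      rw [pvPeel_toDigits n.toNat (by omega)]
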